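-- pv_equiv track=rewrite | github.com/jp-hong-github/BaekJoon | python/0~2499/1407-2로 몇 번 나누어질까.py | calculate
-- ===== SOURCE A (Python) =====
-- def calculate(value):
--     if value == 0:
--         return 0
--     elif value == 1:
--         return 1
--     elif value % 2 == 0:
--         return value // 2 + 2 * calculate(value // 2)
--     else:
--         return value // 2 + 2 * calculate(value // 2) + 1
-- ===== SOURCE B (Python) =====
-- def calculate(value):
--     result = 0
--     weight = 1
--     while value > 0:
--         result += weight * ((value + 1) // 2)
--         weight *= 2
--         value //= 2
--     return result
-- ===== Notes on version B (the rewrite author's own statement) =====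
-- stated objective: alternative
-- what changed: Replaced the recursion on value//2 by an iterative loop accumulating the weighted sum result += weight*((value+1)//2) with weight doubling each step.
import Mathlib
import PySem

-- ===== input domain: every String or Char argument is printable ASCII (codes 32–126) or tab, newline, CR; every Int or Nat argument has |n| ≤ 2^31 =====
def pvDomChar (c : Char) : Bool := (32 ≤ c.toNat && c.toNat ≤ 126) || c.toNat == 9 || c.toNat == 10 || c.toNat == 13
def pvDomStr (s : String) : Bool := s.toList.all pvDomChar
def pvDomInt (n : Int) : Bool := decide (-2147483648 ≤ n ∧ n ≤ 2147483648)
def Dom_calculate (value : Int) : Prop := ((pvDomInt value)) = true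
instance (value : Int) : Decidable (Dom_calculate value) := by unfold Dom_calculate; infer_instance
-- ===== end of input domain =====

-- B replaces A's recursion by an iterative weighted-sum loop; same value on all inputs
-- where A returns (0 ≤ value); on negative values A never returns (infinite recursion).

-- ===== PORT A =====
-- A's recursion never terminates for negative value in Python (value // 2 of -1 is -1),
-- so the port carries a fuel of value.toNat + 1, sufficient for every 0 ≤ value (= Pre_).
def calculateFuel : Nat → Int → Int
  | 0, _ => 0
  | f + 1, value =>
    if value = 0 then 0
    else if value = 1 then 1
    else if PySem.Int.mod value 2 = 0 then
      PySem.Int.floordiv value 2 + 2 * calculateFuel f (PySem.Int.floordiv value 2)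
    else
      PySem.Int.floordiv value 2 + 2 * calculateFuel f (PySem.Int.floordiv value 2) + 1

def calculate (value : Int) : Int := calculateFuel (value.toNat + 1) value

-- ===== PORT B =====
def calcLoop (value weight result : Int) : Int :=
  if 0 < value then
    calcLoop (PySem.Int.floordiv value 2) (weight * 2)
      (result + weight * PySem.Int.floordiv (value + 1) 2)
  else result
termination_by value.toNat
decreasing_by
  rw [PySem.Int.floordiv_eq_ediv_of_pos (by omega : (0:Int) < 2)]
  omega

def calculate_alt (value : Int) : Int := calcLoop value 1 0

-- ===== PRECONDITION & SPEC =====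
-- Pre_: A's Python recursion only returns for non-negative value (it diverges below 0).
def Pre_calculate (value : Int) : Prop := 0 ≤ value
instance (value : Int) : Decidable (Pre_calculate value) := by unfold Pre_calculate; infer_instance
def pvWitness_calculate : Int := (6)

def Spec_calculate (value : Int) (out : Int) : Prop := out = calculate_alt value
instance (value : Int) (out : Int) : Decidable (Spec_calculate value out) := by unfold Spec_calculate; infer_instance

-- ===== CLAIM (what is proved, stated in full; the proofs are below) =====
def Claim_equal_calculate : Prop := ∀ (value : Int), Dom_calculate value → Pre_calculate value → Spec_calculate value (calculate value)

-- ===== LEMMAS AND PROOFS =====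

-- accumulator characterisation of B's loop
theorem calcLoop_acc : ∀ (n : Nat) (value w r : Int), value.toNat ≤ n →
    calcLoop value w r = r + w * calcLoop value 1 0 := by
  intro n
  induction n with
  | zero =>
    intro value w r h
    have hv : ¬ 0 < value := by omega
    conv_lhs => rw [calcLoop]
    conv_rhs => rw [calcLoop]
    rw [if_neg hv, if_neg hv]
    ring
  | succ n ih =>
    intro value w r h
    by_cases hv : 0 < value
    · have h2 : (PySem.Int.floordiv value 2).toNat ≤ n := by
        rw [PySem.Int.floordiv_eq_ediv_of_pos (by omega : (0:Int) < 2)]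
        omega
      conv_lhs => rw [calcLoop]
      conv_rhs => rw [calcLoop]
      rw [if_pos hv, if_pos hv, ih _ _ _ h2]
      conv_rhs => rw [ih _ (1 * 2) (0 + 1 * PySem.Int.floordiv (value + 1) 2) h2]
      ring
    · conv_lhs => rw [calcLoop]
      conv_rhs => rw [calcLoop]
      rw [if_neg hv, if_neg hv]
      ring

theorem main_lemma : ∀ (fuel : Nat) (value : Int), 0 ≤ value → value.toNat < fuel →
    calculateFuel fuel value = calcLoop value 1 0 := by
  intro fuel
  induction fuel with
  | zero => intro value _ h; omega
  | succ f ih =>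
    intro value hv hf
    by_cases h0 : value = 0
    · subst h0
      rw [calculateFuel, calcLoop]
      norm_num
    by_cases h1 : value = 1
    · subst h1
      rw [calculateFuel]
      norm_num
      have e1 : PySem.Int.floordiv 1 2 = 0 := by decide
      have e2 : PySem.Int.floordiv (1 + 1) 2 = 1 := by decide
      rw [calcLoop, if_pos (by norm_num : (0:Int) < 1), e1, e2, calcLoop]
      norm_num
    have hpos : 0 < value := by omega
    have hdiv : PySem.Int.floordiv value 2 = value / 2 :=
      PySem.Int.floordiv_eq_ediv_of_pos (by omega)
    have hdiv1 : PySem.Int.floordiv (value + 1) 2 = (value + 1) / 2 :=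
      PySem.Int.floordiv_eq_ediv_of_pos (by omega)
    have hmod : PySem.Int.mod value 2 = value % 2 :=
      PySem.Int.mod_eq_emod_of_pos (by omega)
    have hrec : calculateFuel f (PySem.Int.floordiv value 2) = calcLoop (PySem.Int.floordiv value 2) 1 0 := by
      apply ih
      · rw [hdiv]; omega
      · rw [hdiv]; omega
    have hacc : calcLoop (PySem.Int.floordiv value 2) (1 * 2) (0 + 1 * PySem.Int.floordiv (value + 1) 2) =
        (0 + 1 * PySem.Int.floordiv (value + 1) 2) + (1 * 2) * calcLoop (PySem.Int.floordiv value 2) 1 0 :=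
      calcLoop_acc ((PySem.Int.floordiv value 2).toNat) _ _ _ (le_refl _)
    rw [calculateFuel]
    rw [if_neg h0, if_neg h1]
    conv_rhs => rw [calcLoop]
    rw [if_pos hpos, hacc, hrec, hmod, hdiv, hdiv1]
    split_ifs with he
    · omega
    · omega

-- ===== VERDICT (by name: the statement is the Claim_ definition above) =====
theorem calculate_spec : Claim_equal_calculate := by
  intro value _ hpre
  unfold Spec_calculate calculate calculate_alt
  exact main_lemma _ _ hpre (by omega)
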